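-- pv_equiv track=rewrite | github.com/alisoufali/diginext_evaluation | question2.py | devide_string_into_everyother_substrings
-- ===== SOURCE A (Python) =====
-- def devide_string_into_everyother_substrings(string: str) -> list[str]:
--     everyother_substrings: list[str] = []
--     string_length = len(string)
--     previous_index = 0
--     for index in range(string_length-1):
--         if string[index] == string[index+1]:
--             everyother_substring = string[previous_index: index+1]
--             everyother_substrings.append(everyother_substring)
--             previous_index = index+1
--     else:
--         everyother_substring = string[previous_index:]
--         everyother_substrings.append(everyother_substring)
--     return everyother_substrings
-- ===== SOURCE B (Python) =====
-- def devide_string_into_everyother_substrings(string: str) -> list[str]: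
--     done = []
--     cur = ''
--     prev = None
--     for c in string:
--         if c == prev:
--             done.append(cur)
--             cur = c
--         else:
--             cur += c
--         prev = c
--     done.append(cur)
--     return done
-- ===== Notes on version B (the rewrite author's own statement) =====
-- stated objective: simpler
-- what changed: B builds the segments by accumulating each character into a growing current-segment string (starting a fresh segment at every equal-adjacent boundary) in one pass, instead of tracking a previous_index and cutting index slices out of the string.
import Mathlib
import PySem

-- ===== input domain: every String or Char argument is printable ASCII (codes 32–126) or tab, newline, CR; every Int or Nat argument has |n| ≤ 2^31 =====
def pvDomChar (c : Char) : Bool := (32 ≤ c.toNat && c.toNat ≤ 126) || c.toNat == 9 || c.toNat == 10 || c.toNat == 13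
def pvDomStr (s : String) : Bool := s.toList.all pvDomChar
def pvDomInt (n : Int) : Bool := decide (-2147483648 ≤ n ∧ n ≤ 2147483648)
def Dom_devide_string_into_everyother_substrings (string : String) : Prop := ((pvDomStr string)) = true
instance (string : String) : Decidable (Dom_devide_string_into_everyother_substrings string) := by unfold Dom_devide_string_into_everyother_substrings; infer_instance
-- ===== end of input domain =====

-- B replaces A's previous_index/slice bookkeeping by accumulating characters into the
-- current segment during a single pass (objective: simpler); same return value everywhere.

-- ===== PORT A =====
-- loop body of A's for-loop (state: built segments as char lists, previous_index)
def Astep (cs : List Char) (st : List (List Char) × Int) (index : Int) : List (List Char) × Int :=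
  if PySem.List.pyGetD cs index ' ' = PySem.List.pyGetD cs (index + 1) ' ' then
    (st.1 ++ [PySem.List.slice cs (some st.2) (some (index + 1))], index + 1)
  else st

-- A's loop from start index j with state (segs, previous_index = p), then the final append
def Arun (cs : List Char) (segs : List (List Char)) (p : Int) (j : Int) : List (List Char) :=
  let st := (PySem.List.pyRange j ((cs.length : Int) - 1) 1).foldl (Astep cs) (segs, p)
  st.1 ++ [PySem.List.slice cs (some st.2) none]

def Acore (cs : List Char) : List String := (Arun cs [] 0 0).map String.ofList

def devide_string_into_everyother_substrings (string : String) : List String :=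
  Acore string.toList

-- ===== PORT B =====
-- loop body of B's for-loop (state: done segments, current segment chars, previous char)
def Bstep (st : List String × List Char × Option Char) (c : Char) :
    List String × List Char × Option Char :=
  match st with
  | (done, cur, prev) =>
    if some c = prev then (done ++ [String.ofList cur], [c], some c)
    else (done, cur ++ [c], some c)

-- B's trailing done.append(cur)
def Bfin (st : List String × List Char × Option Char) : List String :=
  st.1 ++ [String.ofList st.2.1]

def Bcore (cs : List Char) : List String := Bfin (cs.foldl Bstep ([], [], none))

def devide_string_into_everyother_substrings_alt (string : String) : List String :=
  Bcore string.toList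

-- ===== PRECONDITION & SPEC =====
def Spec_devide_string_into_everyother_substrings (string : String) (out : List String) : Prop := out = devide_string_into_everyother_substrings_alt string
instance (string : String) (out : List String) : Decidable (Spec_devide_string_into_everyother_substrings string out) := by unfold Spec_devide_string_into_everyother_substrings; infer_instance

-- ===== CLAIM (what is proved, stated in full; the proofs are below) =====
def Claim_equal_devide_string_into_everyother_substrings : Prop := ∀ (string : String), Dom_devide_string_into_everyother_substrings string → Spec_devide_string_into_everyother_substrings string (devide_string_into_everyother_substrings string)

-- ===== LEMMAS AND PROOFS =====

-- apply f to the head segment only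
def mapHead (f : List Char → List Char) : List (List Char) → List (List Char)
  | [] => []
  | h :: t => f h :: t

-- reference segmentation of a suffix, given the previous character
def Fseg : Char → List Char → List (List Char)
  | _, [] => [[]]
  | p, c :: t => if c = p then [] :: mapHead (c :: ·) (Fseg c t) else mapHead (c :: ·) (Fseg c t)

def Gseg : List Char → List (List Char)
  | [] => [[]]
  | c :: t => mapHead (c :: ·) (Fseg c t)

lemma mapHead_mapHead (f g : List Char → List Char) (l : List (List Char)) :
    mapHead f (mapHead g l) = mapHead (fun x => f (g x)) l := by
  cases l <;> rfl

lemma mapHead_congr {f g : List Char → List Char} (l : List (List Char))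
    (h : ∀ x, f x = g x) : mapHead f l = mapHead g l := by
  cases l <;> simp [mapHead, h]

lemma Fseg_ne_nil : ∀ (l : List Char) (p : Char), Fseg p l ≠ [] := by
  intro l
  induction l with
  | nil => intro p; simp [Fseg]
  | cons c t ih =>
    intro p
    cases h : Fseg c t with
    | nil => exact absurd h (ih c)
    | cons a b => simp only [Fseg, h, mapHead]; split_ifs <;> simp

lemma Arun_eq (cs : List Char) (segs : List (List Char)) (p j : Int) :
    Arun cs segs p j
      = ((PySem.List.pyRange j ((cs.length : Int) - 1) 1).foldl (Astep cs) (segs, p)).1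
        ++ [PySem.List.slice cs
             (some ((PySem.List.pyRange j ((cs.length : Int) - 1) 1).foldl (Astep cs) (segs, p)).2) none] := rfl

lemma B_inv (l : List Char) : ∀ (p : Char) (done : List String) (cur : List Char),
    Bfin (l.foldl Bstep (done, cur, some p))
      = done ++ (mapHead (cur ++ ·) (Fseg p l)).map String.ofList := by
  induction l with
  | nil => intro p done cur; simp [Bfin, Fseg, mapHead]
  | cons c t ih =>
    intro p done cur
    by_cases h : c = p
    · subst h
      simp only [List.foldl_cons, Bstep, reduceIte]
      rw [ih c (done ++ [String.ofList cur]) [c]]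
      simp [Fseg, mapHead]
    · have hs : some c ≠ some p := by simpa using h
      simp only [List.foldl_cons, Bstep, if_neg hs]
      rw [ih c done (cur ++ [c])]
      rw [show Fseg p (c :: t) = mapHead (c :: ·) (Fseg c t) by simp [Fseg, h]]
      rw [mapHead_mapHead]
      exact congrArg _ (congrArg _ (mapHead_congr _ (fun x => by simp)))

lemma Bcore_eq (cs : List Char) : Bcore cs = (Gseg cs).map String.ofList := by
  cases cs with
  | nil => rfl
  | cons c t =>
    unfold Bcore
    have h1 : (c :: t).foldl Bstep ([], [], none) = t.foldl Bstep ([], [c], some c) := by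
      simp [Bstep]
    rw [h1, B_inv t c [] [c]]
    cases h : Fseg c t with
    | nil => exact absurd h (Fseg_ne_nil t c)
    | cons a b => simp [Gseg, mapHead, h]

lemma slice_succ (cs : List Char) (p m : Nat) (hpm : p ≤ m) (hm : m < cs.length) :
    PySem.List.slice cs (some (p : Int)) (some ((m : Int) + 1))
      = PySem.List.slice cs (some (p : Int)) (some (m : Int)) ++ [cs[m]] := by
  have h1 : ((m : Int) + 1) = ((m + 1 : Nat) : Int) := by push_cast; ring
  rw [h1, PySem.List.slice_natCast, PySem.List.slice_natCast]
  have h2 : m + 1 - p = (m - p) + 1 := by omega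
  rw [h2, List.take_add_one]
  congr 1
  have h3 : (cs.drop p)[m - p]? = cs[p + (m - p)]? := List.getElem?_drop ..
  rw [show p + (m - p) = m by omega] at h3
  rw [h3, List.getElem?_eq_getElem hm]
  rfl

lemma slice_full (cs : List Char) (p : Nat) :
    PySem.List.slice cs (some (p : Int)) (some (cs.length : Int))
      = PySem.List.slice cs (some (p : Int)) none := by
  rw [PySem.List.slice_natCast, PySem.List.slice_from_natCast]
  exact List.take_of_length_le (by simp)

lemma A_inv (cs : List Char) : ∀ (k j p : Nat) (segs : List (List Char))
    (hpj : p ≤ j) (hlen : j + 1 + k = cs.length),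
    Arun cs segs (p : Int) (j : Int)
      = segs ++ mapHead (PySem.List.slice cs (some (p : Int)) (some ((j : Int) + 1)) ++ ·)
          (Fseg (cs[j]'(by omega)) (cs.drop (j + 1))) := by
  intro k
  induction k with
  | zero =>
    intro j p segs _hpj hlen
    have hrange : PySem.List.pyRange (j : Int) ((cs.length : Int) - 1) 1 = [] := by
      rw [PySem.List.pyRange_one]
      have : (((cs.length : Int) - 1) - (j : Int)).toNat = 0 := by omega
      simp [this]
    have hdrop : cs.drop (j + 1) = [] := by
      apply List.drop_eq_nil_of_le; omega
    rw [Arun_eq, hrange]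
    simp only [List.foldl_nil, hdrop, Fseg, mapHead, List.append_nil]
    have h1 : ((j : Int) + 1) = ((cs.length : Nat) : Int) := by omega
    rw [h1, slice_full]
  | succ k ih =>
    intro j p segs hpj hlen
    have hj : j < cs.length := by omega
    have hj1 : j + 1 < cs.length := by omega
    have hcast : ((j : Int) + 1) = ((j + 1 : Nat) : Int) := by push_cast; ring
    have hcons : PySem.List.pyRange (j : Int) ((cs.length : Int) - 1) 1
        = (j : Int) :: PySem.List.pyRange ((j + 1 : Nat) : Int) ((cs.length : Int) - 1) 1 := by
      rw [← hcast]; exact PySem.List.pyRange_one_cons (by omega)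
    have hget : PySem.List.pyGetD cs (j : Int) ' ' = cs[j] := by
      rw [PySem.List.pyGetD_natCast]; exact List.getD_eq_getElem _ _ hj
    have hget1 : PySem.List.pyGetD cs ((j : Int) + 1) ' ' = cs[j + 1] := by
      rw [hcast, PySem.List.pyGetD_natCast]; exact List.getD_eq_getElem _ _ hj1
    have hdropj : cs.drop (j + 1) = cs[j + 1] :: cs.drop (j + 2) := by
      rw [List.drop_eq_getElem_cons hj1]
    rw [hcast, Arun_eq, hcons, List.foldl_cons]
    by_cases heq : cs[j + 1] = cs[j]
    · have hstep : Astep cs (segs, (p : Int)) (j : Int)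
          = (segs ++ [PySem.List.slice cs (some (p : Int)) (some ((j + 1 : Nat) : Int))],
             ((j + 1 : Nat) : Int)) := by
        unfold Astep
        rw [hget, hget1, if_pos heq.symm, hcast]
      have hslice : PySem.List.slice cs (some ((j + 1 : Nat) : Int)) (some (((j + 1 : Nat) : Int) + 1))
          = [cs[j + 1]] := by
        rw [slice_succ cs (j + 1) (j + 1) (le_refl _) hj1]
        rw [PySem.List.slice_natCast]
        simp
      rw [hstep, ← Arun_eq]
      rw [ih (j + 1) (j + 1) _ (le_refl _) (by omega)]
      rw [hdropj]
      simp only [Fseg, if_pos heq, show j + 1 + 1 = j + 2 from rfl]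
      rw [mapHead_congr (Fseg cs[j + 1] (cs.drop (j + 2)))
            (fun x => by rw [hslice]; rfl : ∀ x,
              PySem.List.slice cs (some ((j + 1 : Nat) : Int)) (some (((j + 1 : Nat) : Int) + 1)) ++ x
                = cs[j + 1] :: x)]
      simp [mapHead, List.append_assoc]
    · have hstep : Astep cs (segs, (p : Int)) (j : Int) = (segs, (p : Int)) := by
        unfold Astep
        rw [hget, hget1, if_neg (fun h => heq h.symm)]
      rw [hstep, ← Arun_eq]
      rw [ih (j + 1) p segs (by omega) (by omega)]
      rw [hdropj]
      simp only [Fseg, if_neg heq, mapHead_mapHead, show j + 1 + 1 = j + 2 from rfl]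
      exact congrArg _ (mapHead_congr _ (fun x => by
        rw [slice_succ cs p (j + 1) (by omega) hj1]; simp))

lemma Acore_eq (cs : List Char) : Acore cs = (Gseg cs).map String.ofList := by
  cases cs with
  | nil => rfl
  | cons c t =>
    unfold Acore
    rw [show (0 : Int) = ((0 : Nat) : Int) from rfl]
    rw [A_inv (c :: t) t.length 0 0 [] (le_refl _) (by simp only [List.length_cons]; omega)]
    have hsl : PySem.List.slice (c :: t) (some ((0 : Nat) : Int)) (some (((0 : Nat) : Int) + 1))
        = [c] := by
      rw [show (((0 : Nat) : Int) + 1) = ((1 : Nat) : Int) by simp]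
      rw [PySem.List.slice_natCast]
      simp
    rw [hsl]
    simp only [List.nil_append, List.getElem_cons_zero, List.drop_succ_cons, List.drop_zero]
    cases h : Fseg c t with
    | nil => exact absurd h (Fseg_ne_nil t c)
    | cons a b => simp [Gseg, mapHead, h]

-- ===== VERDICT (by name: the statement is the Claim_ definition above) =====
theorem devide_string_into_everyother_substrings_spec : Claim_equal_devide_string_into_everyother_substrings := by
  intro s _
  show devide_string_into_everyother_substrings s = devide_string_into_everyother_substrings_alt s
  unfold devide_string_into_everyother_substrings devide_string_into_everyother_substrings_alt
  rw [Acore_eq, Bcore_eq]
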